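-- pv_equiv track=rewrite | github.com/Fatima-Haneef/python_repo | week1/assignments/assignment_3/math's-operation.py | perfect_squares_in_range
-- ===== SOURCE A (Python) =====
-- def perfect_squares_in_range(start, end):
--     squares = []
--     i = 1
--     while i * i <= end:
--         square = i * i
--         if square >= start and sum_of_digits(square) < 10:
--             squares.append(square)
--         i += 1
--     return squares
--
-- def sum_of_digits(n):
--     total = 0
--     while n > 0:
--         total += n % 10
--         n = n // 10
--     return total
-- ===== SOURCE B (Python) =====
-- def _isqrt(n):
--     # integer square root of n >= 0 by bisection: invariant lo*lo <= n < hi*hi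
--     lo, hi = 0, n + 1
--     while hi - lo > 1:
--         mid = (lo + hi) // 2
--         if mid * mid <= n:
--             lo = mid
--         else:
--             hi = mid
--     return lo
--
-- def _digit_sum(n):
--     return 0 if n <= 0 else n % 10 + _digit_sum(n // 10)
--
-- def perfect_squares_in_range(start, end):
--     if end < 1:
--         return []
--     lo = 1 if start <= 1 else _isqrt(start - 1) + 1
--     hi = _isqrt(end)
--     return [i * i for i in range(lo, hi + 1) if _digit_sum(i * i) < 10]
-- ===== Notes on version B (the rewrite author's own statement) =====
-- stated objective: alternative
-- what changed: Instead of linearly scanning all square roots from 1 and filtering by 'square >= start' inside the loop, B computes the exact root interval [lo, hi] with a bisection integer square root and builds the list by a comprehension over that interval, with a recursive (not accumulator-loop) digit sum.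
import Mathlib
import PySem

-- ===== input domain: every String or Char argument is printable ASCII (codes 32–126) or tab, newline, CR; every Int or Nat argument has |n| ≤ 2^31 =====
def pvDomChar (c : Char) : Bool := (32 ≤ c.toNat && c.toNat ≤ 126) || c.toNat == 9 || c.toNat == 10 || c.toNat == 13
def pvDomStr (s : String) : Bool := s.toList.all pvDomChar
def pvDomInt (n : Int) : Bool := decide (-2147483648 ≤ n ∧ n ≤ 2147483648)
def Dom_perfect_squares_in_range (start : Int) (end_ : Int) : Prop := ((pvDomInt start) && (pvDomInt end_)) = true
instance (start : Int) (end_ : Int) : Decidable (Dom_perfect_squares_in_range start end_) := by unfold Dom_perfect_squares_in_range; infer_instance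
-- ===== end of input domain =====

-- B replaces A's linear scan over all roots (with an in-loop 'square >= start' filter and an
-- accumulator digit-sum loop) by a bisection integer square root giving the exact root interval,
-- a comprehension over that interval, and a recursive digit sum; objective: alternative.

-- ===== PORT A =====
-- while n > 0: total += n % 10; n = n // 10
def sum_of_digits_loop (n total : Int) : Int :=
  if _h : n > 0 then
    sum_of_digits_loop (PySem.Int.floordiv n 10) (total + PySem.Int.mod n 10)
  else total
termination_by n.toNat
decreasing_by
  have := PySem.Int.floordiv_eq_ediv_of_pos (a := n) (b := 10) (by omega)
  omega

def sum_of_digits (n : Int) : Int := sum_of_digits_loop n 0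

-- while i * i <= end: square = i * i; if square >= start and sum_of_digits(square) < 10: append; i += 1
def psir_loop (start end_ i : Int) (acc : List Int) (hi1 : 1 ≤ i) : List Int :=
  if _h : i * i ≤ end_ then
    psir_loop start end_ (i + 1)
      (if i * i ≥ start ∧ sum_of_digits (i * i) < 10 then acc ++ [i * i] else acc)
      (by omega)
  else acc
termination_by (end_ + 1 - i).toNat
decreasing_by
  have h2 : i ≤ i * i := by nlinarith
  omega

def perfect_squares_in_range (start : Int) (end_ : Int) : List Int :=
  psir_loop start end_ 1 [] (by omega)

-- ===== PORT B =====
-- bisection integer square root: lo, hi = 0, n + 1; while hi - lo > 1: mid = (lo+hi)//2; …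
def isqrt_loop (n lo hi : Int) : Int :=
  if _h : hi - lo > 1 then
    let mid := PySem.Int.floordiv (lo + hi) 2
    if mid * mid ≤ n then isqrt_loop n mid hi else isqrt_loop n lo mid
  else lo
termination_by (hi - lo).toNat
decreasing_by
  all_goals
    have := PySem.Int.floordiv_eq_ediv_of_pos (a := lo + hi) (b := 2) (by omega)
    omega

def isqrt (n : Int) : Int := isqrt_loop n 0 (n + 1)

-- return 0 if n <= 0 else n % 10 + _digit_sum(n // 10)
def digit_sum_alt (n : Int) : Int :=
  if _h : n ≤ 0 then 0
  else PySem.Int.mod n 10 + digit_sum_alt (PySem.Int.floordiv n 10)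
termination_by n.toNat
decreasing_by
  have := PySem.Int.floordiv_eq_ediv_of_pos (a := n) (b := 10) (by omega)
  omega

def perfect_squares_in_range_alt (start : Int) (end_ : Int) : List Int :=
  if end_ < 1 then []
  else
    let lo := if start ≤ 1 then 1 else isqrt (start - 1) + 1
    let hi := isqrt end_
    ((PySem.List.pyRange lo (hi + 1) 1).filter
        (fun i => decide (digit_sum_alt (i * i) < 10))).map (fun i => i * i)

-- ===== PRECONDITION & SPEC =====
def Spec_perfect_squares_in_range (start : Int) (end_ : Int) (out : List Int) : Prop := out = perfect_squares_in_range_alt start end_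
instance (start : Int) (end_ : Int) (out : List Int) : Decidable (Spec_perfect_squares_in_range start end_ out) := by unfold Spec_perfect_squares_in_range; infer_instance

-- ===== CLAIM (what is proved, stated in full; the proofs are below) =====
def Claim_equal_perfect_squares_in_range : Prop := ∀ (start : Int) (end_ : Int), Dom_perfect_squares_in_range start end_ → Spec_perfect_squares_in_range start end_ (perfect_squares_in_range start end_)

-- ===== LEMMAS AND PROOFS =====

-- the two digit-sum helpers agree
theorem sum_of_digits_loop_eq (n t : Int) : sum_of_digits_loop n t = t + digit_sum_alt n := by
  fun_induction sum_of_digits_loop n t with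
  | case1 n t h ih =>
      rw [digit_sum_alt]; rw [dif_neg (by omega : ¬ n ≤ 0)]; rw [ih]; ring
  | case2 n t h =>
      rw [digit_sum_alt]; rw [dif_pos (by omega : n ≤ 0)]; ring

theorem sum_of_digits_eq (n : Int) : sum_of_digits n = digit_sum_alt n := by
  rw [sum_of_digits, sum_of_digits_loop_eq]; ring

-- bisection invariant: lo*lo ≤ n < hi*hi is preserved, so the result is the integer square root
theorem isqrt_loop_spec (n : Int) : ∀ (k : ℕ) (lo hi : Int), (hi - lo).toNat ≤ k →
    lo * lo ≤ n → n < hi * hi → lo < hi → 0 ≤ lo →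
    (isqrt_loop n lo hi) * (isqrt_loop n lo hi) ≤ n ∧
    n < (isqrt_loop n lo hi + 1) * (isqrt_loop n lo hi + 1) ∧ 0 ≤ isqrt_loop n lo hi := by
  intro k
  induction k with
  | zero => intro lo hi hk h1 h2 h3 h0; omega
  | succ k ih =>
    intro lo hi hk h1 h2 h3 h0
    rw [isqrt_loop]
    by_cases hgap : hi - lo > 1
    · rw [dif_pos hgap]
      have hmid := PySem.Int.floordiv_eq_ediv_of_pos (a := lo + hi) (b := 2) (by omega)
      set mid := PySem.Int.floordiv (lo + hi) 2 with hm
      have hlo : lo < mid := by omega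
      have hhi : mid < hi := by omega
      by_cases hc : mid * mid ≤ n
      · rw [if_pos hc]
        exact ih mid hi (by omega) hc h2 hhi (by omega)
      · rw [if_neg hc]
        exact ih lo mid (by omega) h1 (by omega) hlo h0
    · rw [dif_neg hgap]
      have : hi = lo + 1 := by omega
      refine ⟨h1, by (rw [this] at h2; linarith), h0⟩

theorem isqrt_spec (n : Int) (hn : 0 ≤ n) :
    (isqrt n) * (isqrt n) ≤ n ∧ n < (isqrt n + 1) * (isqrt n + 1) ∧ 0 ≤ isqrt n := by
  have := isqrt_loop_spec n (n + 1 - 0).toNat 0 (n + 1) (by omega) (by nlinarith) (by nlinarith) (by omega) (by omega)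
  simpa [isqrt] using this

theorem sq_le_iff (n r i : Int) (hr : r * r ≤ n) (hr2 : n < (r + 1) * (r + 1)) (hi : 0 ≤ i) :
    i * i ≤ n ↔ i ≤ r := by
  constructor
  · intro h; by_contra hc; push Not at hc; nlinarith
  · intro h; nlinarith

-- characterization of A's while loop as filter-then-map over the root range
theorem psir_loop_eq (start end_ : Int) (R : Int)
    (hR : ∀ i : Int, 1 ≤ i → (i * i ≤ end_ ↔ i ≤ R)) :
    ∀ (k : ℕ) (i : Int) (acc : List Int) (hi1 : 1 ≤ i), (R + 1 - i).toNat ≤ k →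
      psir_loop start end_ i acc hi1 =
      acc ++ ((PySem.List.pyRange i (R + 1) 1).filter
          (fun j => decide (j * j ≥ start) && decide (sum_of_digits (j * j) < 10))).map
          (fun j => j * j) := by
  intro k
  induction k with
  | zero =>
    intro i acc hi1 hk
    have hile : ¬ i * i ≤ end_ := by
      intro h; have := (hR i hi1).mp h; omega
    rw [psir_loop, dif_neg hile, PySem.List.pyRange_one_eq_nil (by omega)]
    simp
  | succ k ih =>
    intro i acc hi1 hk
    rw [psir_loop]
    by_cases h : i * i ≤ end_
    · have hiR : i ≤ R := (hR i hi1).mp h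
      rw [dif_pos h, ih (i + 1) _ (by omega) (by omega)]
      rw [PySem.List.pyRange_one_cons (by omega : i < R + 1)]
      by_cases hc : i * i ≥ start ∧ sum_of_digits (i * i) < 10
      · rw [if_pos hc]
        simp [hc.1, hc.2]
      · rw [if_neg hc]
        have : (decide (i * i ≥ start) && decide (sum_of_digits (i * i) < 10)) = false := by
          rcases Decidable.not_and_iff_not_or_not.mp hc with h' | h' <;> simp [h']
        simp [this]
    · have hiR : ¬ i ≤ R := fun hle => h ((hR i hi1).mpr hle)
      rw [dif_neg h, PySem.List.pyRange_one_eq_nil (by omega)]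
      simp

-- ===== VERDICT (by name: the statement is the Claim_ definition above) =====
theorem perfect_squares_in_range_spec : Claim_equal_perfect_squares_in_range := by
  intro start end_ _dom
  unfold Spec_perfect_squares_in_range
  by_cases hend : end_ < 1
  · rw [perfect_squares_in_range, psir_loop, dif_neg (by nlinarith : ¬ (1 : Int) * 1 ≤ end_)]
    simp [perfect_squares_in_range_alt, if_pos hend]
  · obtain ⟨hA, hB, hC⟩ := isqrt_spec end_ (by omega)
    set R := isqrt end_ with hRdef
    have hsq : ∀ i : Int, 1 ≤ i → (i * i ≤ end_ ↔ i ≤ R) :=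
      fun i hi => sq_le_iff end_ R i hA hB (by omega)
    have hloL : ∀ lo_ : Int, 1 ≤ lo_ → (∀ j : Int, 1 ≤ j → (j * j ≥ start ↔ lo_ ≤ j)) →
        perfect_squares_in_range start end_ =
        ((PySem.List.pyRange lo_ (R + 1) 1).filter
            (fun j => decide (sum_of_digits (j * j) < 10))).map (fun j => j * j) := by
      intro lo_ hlo1 hlo
      rw [perfect_squares_in_range,
        psir_loop_eq start end_ R hsq (R + 1 - 1).toNat 1 [] (by omega) (by omega)]
      rw [List.nil_append]
      congr 1
      by_cases hcase : lo_ ≤ R + 1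
      · rw [PySem.List.pyRange_one_append 1 lo_ (R + 1) hlo1 hcase, List.filter_append]
        have h1 : (PySem.List.pyRange 1 lo_ 1).filter
            (fun j => decide (j * j ≥ start) && decide (sum_of_digits (j * j) < 10)) = [] := by
          apply List.filter_eq_nil_iff.mpr
          intro j hj
          rw [PySem.List.mem_pyRange_one] at hj
          have : ¬ (j * j ≥ start) := by
            intro h'; have := (hlo j hj.1).mp h'; omega
          simp [this]
        rw [h1, List.nil_append]
        apply List.filter_congr
        intro j hj
        rw [PySem.List.mem_pyRange_one] at hj
        have hge : j * j ≥ start := (hlo j (by omega)).mpr hj.1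
        simp [hge]
      · rw [PySem.List.pyRange_one_eq_nil (by omega : R + 1 ≤ lo_)]
        apply List.filter_eq_nil_iff.mpr
        intro j hj
        rw [PySem.List.mem_pyRange_one] at hj
        have : ¬ (j * j ≥ start) := by
          intro h'; have := (hlo j hj.1).mp h'; omega
        simp [this]
    by_cases hst : start ≤ 1
    · rw [hloL 1 le_rfl (by intro j hj; constructor <;> intro <;> nlinarith)]
      simp only [perfect_squares_in_range_alt, if_neg hend, if_pos hst]
      congr 1
      apply List.filter_congr
      intro j _
      simp [sum_of_digits_eq]
    · obtain ⟨hA', hB', hC'⟩ := isqrt_spec (start - 1) (by omega)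
      set s := isqrt (start - 1) with hsdef
      rw [hloL (s + 1) (by omega) ?_]
      · simp only [perfect_squares_in_range_alt, if_neg hend, if_neg hst]
        congr 1
        apply List.filter_congr
        intro j _
        simp [sum_of_digits_eq]
      · intro j hj
        have hiff := sq_le_iff (start - 1) s j hA' hB' (by omega)
        constructor
        · intro h'
          have hnot : ¬ j ≤ s := fun hle => by have := hiff.mpr hle; omega
          omega
        · intro h'
          have hnot : ¬ j * j ≤ start - 1 := fun hle => by have := hiff.mp hle; omega
          omega
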